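-- pv_equiv track=rewrite | github.com/aabhishek-chaurasia-au17/python_practice | DSA/matrix/pr.py | solve
-- ===== SOURCE A (Python) =====
-- def solve(d, n):
--     left = dict()
--
--     count = dict()
--     z = 0
--
--     k, strindex = 0, 0
--
--     for i in range(n):
--         x = d[i]
--         if (x not in count.keys()):
--             left[x] = i
--             count[x] = 1
--         else:
--             count[x] += 1
--
--         if (count[x] > z):
--             z = count[x]
--             k = i - left[x] + 1
--             strindex = left[x]
--
--         elif (count[x] == z and
--             i - left[x] + 1 < k):
--             k = i - left[x] + 1
--             strindex = left[x]
--     ans = 0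
--     for i in range(strindex, strindex + k):
--         ans += 1
--     return ans
-- ===== SOURCE B (Python) =====
-- def solve(d, n):
--     count = {}
--     first = {}
--     last = {}
--     for i in range(n):
--         x = d[i]
--         if x not in count:
--             count[x] = 0
--             first[x] = i
--         count[x] += 1
--         last[x] = i
--     if not count:
--         return 0
--     m = max(count.values())
--     return min(last[x] - first[x] + 1 for x in count if count[x] == m)
-- ===== Notes on version B (the rewrite author's own statement) =====
-- stated objective: simpler
-- what changed: Replaces A's online running-max/tie-break state machine (and its final counting loop) with one pass building count/first/last tables followed by a select: max frequency, then min span among its achievers.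
import Mathlib
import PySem

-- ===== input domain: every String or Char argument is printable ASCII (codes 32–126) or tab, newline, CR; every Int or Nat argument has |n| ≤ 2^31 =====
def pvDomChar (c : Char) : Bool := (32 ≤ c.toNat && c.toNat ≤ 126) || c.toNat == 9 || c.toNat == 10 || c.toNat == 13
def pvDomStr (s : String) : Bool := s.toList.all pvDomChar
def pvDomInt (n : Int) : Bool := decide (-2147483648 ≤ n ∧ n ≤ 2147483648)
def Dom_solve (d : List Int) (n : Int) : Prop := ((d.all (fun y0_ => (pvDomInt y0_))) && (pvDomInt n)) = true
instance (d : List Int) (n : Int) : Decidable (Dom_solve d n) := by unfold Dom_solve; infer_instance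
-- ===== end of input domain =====

-- B replaces A's online running-max/tie-break state machine (and its final counting loop)
-- by building count/first/last tables in one pass and then selecting: max frequency,
-- then minimal span among its achievers (objective: simpler).

-- ===== PORT A =====
-- loop body of A: x is d[i], state is (left, count, z, k, strindex)
def stepA (x i : Int)
    (st : PySem.Dict Int Int × PySem.Dict Int Int × Int × Int × Int) :
    PySem.Dict Int Int × PySem.Dict Int Int × Int × Int × Int :=
  match st with
  | (left, count, z, k, strindex) =>
    let lc := if !(count.contains x) then (left.insert x i, count.insert x 1)
              else (left, count.modify x 0 (· + 1))
    match lc with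
    | (left, count) =>
      let cx := count.getD x 0
      if cx > z then (left, count, cx, i - left.getD x 0 + 1, left.getD x 0)
      else if cx = z ∧ i - left.getD x 0 + 1 < k then
        (left, count, z, i - left.getD x 0 + 1, left.getD x 0)
      else (left, count, z, k, strindex)

def solve (d : List Int) (n : Int) : Int :=
  match (PySem.List.pyRange 0 n 1).foldl
    (fun st i => stepA (PySem.List.pyGetD d i 0) i st)
    (PySem.Dict.empty, PySem.Dict.empty, 0, 0, 0) with
  | (_, _, _, k, strindex) =>
    (PySem.List.pyRange strindex (strindex + k) 1).foldl (fun ans _ => ans + 1) 0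

-- ===== PORT B =====
-- loop body of B: x is d[i], state is (count, first, last)
def stepB (x i : Int)
    (t : PySem.Dict Int Int × PySem.Dict Int Int × PySem.Dict Int Int) :
    PySem.Dict Int Int × PySem.Dict Int Int × PySem.Dict Int Int :=
  match t with
  | (count, first, last) =>
    let cf := if !(count.contains x) then (count.insert x 0, first.insert x i)
              else (count, first)
    match cf with
    | (count, first) => (count.modify x 0 (· + 1), first, last.insert x i)

def solve_alt (d : List Int) (n : Int) : Int :=
  match (PySem.List.pyRange 0 n 1).foldl
    (fun t i => stepB (PySem.List.pyGetD d i 0) i t)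
    (PySem.Dict.empty, PySem.Dict.empty, PySem.Dict.empty) with
  | (count, first, last) =>
    if count.size = 0 then 0
    else
      match PySem.List.max? count.values (fun v => v) with
      | none => 0
      | some m =>
        match PySem.List.min? ((count.keys.filter (fun x => count.getD x 0 == m)).map
              (fun x => last.getD x 0 - first.getD x 0 + 1)) (fun v => v) with
        | none => 0
        | some r => r

-- ===== PRECONDITION & SPEC =====
-- Pre_ excludes exactly the inputs where A raises IndexError: n larger than len(d).
def Pre_solve (d : List Int) (n : Int) : Prop := n ≤ (d.length : Int)
instance (d : List Int) (n : Int) : Decidable (Pre_solve d n) := by unfold Pre_solve; infer_instance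
def pvWitness_solve : List Int × Int := ([1, 2, 2, 1, 2], 5)

def Spec_solve (d : List Int) (n : Int) (out : Int) : Prop := out = solve_alt d n
instance (d : List Int) (n : Int) (out : Int) : Decidable (Spec_solve d n out) := by unfold Spec_solve; infer_instance

-- ===== CLAIM (what is proved, stated in full; the proofs are below) =====
def Claim_equal_solve : Prop := ∀ (d : List Int) (n : Int), Dom_solve d n → Pre_solve d n → Spec_solve d n (solve d n)

-- ===== LEMMAS AND PROOFS =====

-- index of the first / last occurrence of v in xs, and the span between them
def fIdx (xs : List Int) (v : Int) : Int := (xs.idxOf v : Int)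
def lIdx (xs : List Int) (v : Int) : Int := (xs.length : Int) - 1 - (xs.reverse.idxOf v : Int)
def spanOf (xs : List Int) (v : Int) : Int := lIdx xs v - fIdx xs v + 1

theorem fIdx_lt_length (xs : List Int) (v : Int) (h : v ∈ xs) : fIdx xs v < (xs.length : Int) := by
  simp [fIdx]
  exact_mod_cast List.idxOf_lt_length_of_mem h

theorem fIdx_append_mem (xs : List Int) (x v : Int) (h : v ∈ xs) :
    fIdx (xs ++ [x]) v = fIdx xs v := by
  simp [fIdx, List.idxOf_append_of_mem h]

theorem fIdx_append_self (xs : List Int) (x : Int) (h : x ∉ xs) :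
    fIdx (xs ++ [x]) x = (xs.length : Int) := by
  simp [fIdx, List.idxOf_append, h]

theorem lIdx_append_self (xs : List Int) (x : Int) :
    lIdx (xs ++ [x]) x = (xs.length : Int) := by
  simp [lIdx, List.reverse_append, List.idxOf_cons_self]

theorem lIdx_append_ne (xs : List Int) (x v : Int) (h : v ≠ x) :
    lIdx (xs ++ [x]) v = lIdx xs v := by
  simp [lIdx, List.reverse_append, List.idxOf_cons_ne _ (Ne.symm h)]
  omega

-- A's loop invariant over the processed prefix xs
def InvA (xs : List Int)
    (st : PySem.Dict Int Int × PySem.Dict Int Int × Int × Int × Int) : Prop :=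
  (∀ v, st.2.1.getD v 0 = (xs.count v : Int)) ∧
  (∀ v, st.2.1.contains v = decide (v ∈ xs)) ∧
  (∀ v ∈ xs, st.1.getD v 0 = fIdx xs v) ∧
  (∀ v ∈ xs, (xs.count v : Int) ≤ st.2.2.1) ∧
  0 ≤ st.2.2.2.1 ∧
  (xs = [] → st.2.2.1 = 0 ∧ st.2.2.2.1 = 0) ∧
  (xs ≠ [] → ∃ v, v ∈ xs ∧ (xs.count v : Int) = st.2.2.1 ∧ spanOf xs v = st.2.2.2.1) ∧
  (∀ v ∈ xs, (xs.count v : Int) = st.2.2.1 → st.2.2.2.1 ≤ spanOf xs v)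

-- B's loop invariant over the processed prefix xs
def InvB (xs : List Int)
    (t : PySem.Dict Int Int × PySem.Dict Int Int × PySem.Dict Int Int) : Prop :=
  (∀ v, t.1.getD v 0 = (xs.count v : Int)) ∧
  (∀ v, t.1.contains v = decide (v ∈ xs)) ∧
  t.1.keys.Nodup ∧
  (xs = [] → t.1 = PySem.Dict.empty) ∧
  (∀ v ∈ xs, t.2.1.getD v 0 = fIdx xs v) ∧
  (∀ v ∈ xs, t.2.2.getD v 0 = lIdx xs v)

theorem zk_step (xs : List Int) (x : Int) (left' count' : PySem.Dict Int Int)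
    (z k strindex : Int)
    (hcg : ∀ v, count'.getD v 0 = ((xs ++ [x]).count v : Int))
    (hcc : ∀ v, count'.contains v = decide (v ∈ xs ++ [x]))
    (hlg : ∀ v ∈ xs ++ [x], left'.getD v 0 = fIdx (xs ++ [x]) v)
    (h4 : ∀ v ∈ xs, (xs.count v : Int) ≤ z) (h5 : 0 ≤ k)
    (h6 : xs = [] → z = 0 ∧ k = 0)
    (h7 : xs ≠ [] → ∃ v, v ∈ xs ∧ (xs.count v : Int) = z ∧ spanOf xs v = k)
    (h8 : ∀ v ∈ xs, (xs.count v : Int) = z → k ≤ spanOf xs v) :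
    InvA (xs ++ [x])
      (if count'.getD x 0 > z then
        (left', count', count'.getD x 0, (xs.length : Int) - left'.getD x 0 + 1, left'.getD x 0)
      else if count'.getD x 0 = z ∧ (xs.length : Int) - left'.getD x 0 + 1 < k then
        (left', count', z, (xs.length : Int) - left'.getD x 0 + 1, left'.getD x 0)
      else (left', count', z, k, strindex)) := by
  have hxmem : x ∈ xs ++ [x] := by simp
  have hcx : count'.getD x 0 = ((xs ++ [x]).count x : Int) := hcg x
  have hcx' : ((xs ++ [x]).count x : Int) = (xs.count x : Int) + 1 := by
    simp [List.count_append]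
  have hcv : ∀ v : Int, v ≠ x → (xs ++ [x]).count v = xs.count v := by
    intro v hv; simp [List.count_append, Ne.symm hv]
  have hmem : ∀ v : Int, v ∈ xs ++ [x] ↔ v ∈ xs ∨ v = x := by
    intro v; simp
  have hLx : left'.getD x 0 = fIdx (xs ++ [x]) x := hlg x hxmem
  have hspanx : spanOf (xs ++ [x]) x = (xs.length : Int) - left'.getD x 0 + 1 := by
    rw [hLx, spanOf, lIdx_append_self]
  have hfxle : fIdx (xs ++ [x]) x ≤ (xs.length : Int) := by
    have := fIdx_lt_length (xs ++ [x]) x hxmem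
    simp only [List.length_append, List.length_cons, List.length_nil] at this
    push_cast at this
    omega
  have hspanx_pos : (1 : Int) ≤ spanOf (xs ++ [x]) x := by
    rw [hspanx, hLx]; omega
  have hspan_keep : ∀ v ∈ xs, v ≠ x → spanOf (xs ++ [x]) v = spanOf xs v := by
    intro v hv hvx
    rw [spanOf, spanOf, fIdx_append_mem _ _ _ hv, lIdx_append_ne _ _ _ hvx]
  have hcount_mem : ∀ v : Int, v ∈ xs → (0 : Int) < (xs.count v : Int) := by
    intro v hv; exact_mod_cast List.count_pos_iff.mpr hv
  by_cases hgt : count'.getD x 0 > z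
  · rw [if_pos hgt]
    refine ⟨hcg, hcc, hlg, ?_, ?_, ?_, ?_, ?_⟩
    · intro v hv
      simp only
      rcases (hmem v).mp hv with hvx | rfl
      · by_cases hvx2 : v = x
        · subst hvx2; rw [← hcx]
        · rw [hcv v hvx2]
          have := h4 v hvx
          omega
      · rw [← hcx]
    · simp only
      rw [hspanx] at hspanx_pos; omega
    · intro hnil; simp at hnil
    · intro _
      exact ⟨x, hxmem, by rw [← hcx], by rw [hspanx]⟩
    · intro v hv hveq
      simp only at hveq ⊢
      by_cases hvx : v = x
      · subst hvx; rw [← hspanx]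
      · exfalso
        have hvxs : v ∈ xs := by rcases (hmem v).mp hv with h | h; exact h; exact absurd h hvx
        rw [hcv v hvx] at hveq
        have := h4 v hvxs
        rw [hcx, hcx'] at hgt
        have hcxle : (xs.count x : Int) ≤ z := by
          by_cases hxxs : x ∈ xs
          · exact h4 x hxxs
          · have : xs.count x = 0 := List.count_eq_zero.mpr hxxs
            rw [this]; push_cast
            rcases List.exists_mem_of_ne_nil xs (by rintro rfl; simp at hvxs) with ⟨w, hw⟩
            have := hcount_mem w hw
            have := h4 w hw
            omega
        omega
  · rw [if_neg hgt]
    have hcxz : ((xs ++ [x]).count x : Int) ≤ z := by rw [← hcx]; omega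
    have hxs_ne : xs ≠ [] := by
      rintro rfl
      obtain ⟨hz, hk⟩ := h6 rfl
      rw [hcx, hcx'] at hgt
      simp at hgt
      omega
    by_cases htie : count'.getD x 0 = z ∧ (xs.length : Int) - left'.getD x 0 + 1 < k
    · rw [if_pos htie]
      refine ⟨hcg, hcc, hlg, ?_, ?_, ?_, ?_, ?_⟩
      · intro v hv
        simp only
        rcases (hmem v).mp hv with hvx | rfl
        · by_cases hvx2 : v = x
          · subst hvx2; exact hcxz
          · rw [hcv v hvx2]; exact h4 v hvx
        · exact hcxz
      · simp only; omega
      · intro hnil; simp at hnil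
      · intro _
        exact ⟨x, hxmem, by rw [← hcx, htie.1], by rw [hspanx]⟩
      · intro v hv hveq
        simp only at hveq ⊢
        by_cases hvx : v = x
        · subst hvx; rw [← hspanx]
        · have hvxs : v ∈ xs := by rcases (hmem v).mp hv with h | h; exact h; exact absurd h hvx
          rw [hcv v hvx] at hveq
          have := h8 v hvxs hveq
          rw [hspan_keep v hvxs hvx]
          omega
    · rw [if_neg htie]
      obtain ⟨w, hw, hwz, hwk⟩ := h7 hxs_ne
      have hwx : w ≠ x := by
        rintro rfl
        rw [hcx, hcx', hwz] at hgt
        omega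
      refine ⟨hcg, hcc, hlg, ?_, h5, ?_, ?_, ?_⟩
      · intro v hv
        simp only
        rcases (hmem v).mp hv with hvx | rfl
        · by_cases hvx2 : v = x
          · subst hvx2; exact hcxz
          · rw [hcv v hvx2]; exact h4 v hvx
        · exact hcxz
      · intro hnil; simp at hnil
      · intro _
        refine ⟨w, by simp [hmem, hw], ?_, ?_⟩
        · rw [hcv w hwx]; exact hwz
        · rw [hspan_keep w hw hwx]; exact hwk
      · intro v hv hveq
        simp only at hveq ⊢
        by_cases hvx : v = x
        · subst hvx
          have hz : count'.getD v 0 = z := by rw [hcx]; omega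
          have : ¬ ((xs.length : Int) - left'.getD v 0 + 1 < k) := by
            intro hlt; exact htie ⟨hz, hlt⟩
          rw [hspanx]; omega
        · have hvxs : v ∈ xs := by rcases (hmem v).mp hv with h | h; exact h; exact absurd h hvx
          rw [hcv v hvx] at hveq
          rw [hspan_keep v hvxs hvx]
          exact h8 v hvxs hveq

theorem invA_step (xs : List Int) (x : Int) (st) (h : InvA xs st) :
    InvA (xs ++ [x]) (stepA x (xs.length : Int) st) := by
  obtain ⟨left, count, z, k, strindex⟩ := st
  obtain ⟨h1, h2, h3, h4, h5, h6, h7, h8⟩ := h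
  simp only at h1 h2 h3 h4 h5 h6 h7 h8
  by_cases hx : x ∈ xs
  · have hc : count.contains x = true := by rw [h2]; simp [hx]
    have e : stepA x (xs.length : Int) (left, count, z, k, strindex) =
        (if (count.modify x 0 (· + 1)).getD x 0 > z then
          (left, count.modify x 0 (· + 1), (count.modify x 0 (· + 1)).getD x 0,
            (xs.length : Int) - left.getD x 0 + 1, left.getD x 0)
        else if (count.modify x 0 (· + 1)).getD x 0 = z ∧
            (xs.length : Int) - left.getD x 0 + 1 < k then
          (left, count.modify x 0 (· + 1), z, (xs.length : Int) - left.getD x 0 + 1,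
            left.getD x 0)
        else (left, count.modify x 0 (· + 1), z, k, strindex)) := by
      simp [stepA, hc]
    rw [e]
    apply zk_step xs x left (count.modify x 0 (· + 1)) z k strindex
    · intro v
      rw [PySem.Dict.getD_modify]
      by_cases hvx : v = x
      · subst hvx
        rw [if_pos rfl, h1]
        simp [List.count_append]
      · rw [if_neg hvx, h1]
        simp [List.count_append, Ne.symm hvx]
    · intro v
      rw [PySem.Dict.contains_modify, h2]
      by_cases hvx : v = x
      · subst hvx; simp [hx]
      · simp [hvx]
    · intro v hv
      rcases List.mem_append.mp hv with hvxs | hvx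
      · rw [h3 v hvxs, fIdx_append_mem _ _ _ hvxs]
      · have : v = x := by simpa using hvx
        subst this
        rw [h3 v hx, fIdx_append_mem _ _ _ hx]
    · exact h4
    · exact h5
    · exact h6
    · exact h7
    · exact h8
  · have hc : count.contains x = false := by rw [h2]; simp [hx]
    have e : stepA x (xs.length : Int) (left, count, z, k, strindex) =
        (if (count.insert x 1).getD x 0 > z then
          (left.insert x (xs.length : Int), count.insert x 1, (count.insert x 1).getD x 0,
            (xs.length : Int) - (left.insert x (xs.length : Int)).getD x 0 + 1,
            (left.insert x (xs.length : Int)).getD x 0)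
        else if (count.insert x 1).getD x 0 = z ∧
            (xs.length : Int) - (left.insert x (xs.length : Int)).getD x 0 + 1 < k then
          (left.insert x (xs.length : Int), count.insert x 1, z,
            (xs.length : Int) - (left.insert x (xs.length : Int)).getD x 0 + 1,
            (left.insert x (xs.length : Int)).getD x 0)
        else (left.insert x (xs.length : Int), count.insert x 1, z, k, strindex)) := by
      simp [stepA, hc]
    rw [e]
    apply zk_step xs x (left.insert x (xs.length : Int)) (count.insert x 1) z k strindex
    · intro v
      rw [PySem.Dict.getD_insert]
      by_cases hvx : v = x
      · subst hvx
        rw [if_pos rfl]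
        have : xs.count v = 0 := List.count_eq_zero.mpr hx
        simp [List.count_append, this]
      · rw [if_neg hvx, h1]
        simp [List.count_append, Ne.symm hvx]
    · intro v
      rw [PySem.Dict.contains_insert, h2]
      by_cases hvx : v = x
      · subst hvx; simp
      · simp [hvx]
    · intro v hv
      rw [PySem.Dict.getD_insert]
      by_cases hvx : v = x
      · subst hvx
        rw [if_pos rfl, fIdx_append_self _ _ hx]
      · rw [if_neg hvx]
        have hvxs : v ∈ xs := by
          rcases List.mem_append.mp hv with h' | h'
          · exact h'
          · exact absurd (by simpa using h') hvx
        rw [h3 v hvxs, fIdx_append_mem _ _ _ hvxs]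
    · exact h4
    · exact h5
    · exact h6
    · exact h7
    · exact h8

theorem invB_step (xs : List Int) (x : Int) (t) (h : InvB xs t) :
    InvB (xs ++ [x]) (stepB x (xs.length : Int) t) := by
  obtain ⟨count, first, last⟩ := t
  obtain ⟨h1, h2, h3, h4, h5, h6⟩ := h
  simp only at h1 h2 h3 h4 h5 h6
  have hlast : ∀ v ∈ xs ++ [x], (last.insert x (xs.length : Int)).getD v 0 = lIdx (xs ++ [x]) v := by
    intro v hv
    rw [PySem.Dict.getD_insert]
    by_cases hvx : v = x
    · subst hvx; rw [if_pos rfl, lIdx_append_self]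
    · rw [if_neg hvx]
      have hvxs : v ∈ xs := by
        rcases List.mem_append.mp hv with h' | h'
        · exact h'
        · exact absurd (by simpa using h') hvx
      rw [h6 v hvxs, lIdx_append_ne _ _ _ hvx]
  by_cases hx : x ∈ xs
  · have hc : count.contains x = true := by rw [h2]; simp [hx]
    have e : stepB x (xs.length : Int) (count, first, last) =
        (count.modify x 0 (· + 1), first, last.insert x (xs.length : Int)) := by
      simp [stepB, hc]
    rw [e]
    refine ⟨?_, ?_, ?_, ?_, ?_, ?_⟩
    · intro v
      simp only
      rw [PySem.Dict.getD_modify]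
      by_cases hvx : v = x
      · subst hvx; rw [if_pos rfl, h1]; simp [List.count_append]
      · rw [if_neg hvx, h1]; simp [List.count_append, Ne.symm hvx]
    · intro v
      simp only
      rw [PySem.Dict.contains_modify, h2]
      by_cases hvx : v = x
      · subst hvx; simp [hx]
      · simp [hvx]
    · simp only
      rw [PySem.Dict.keys_modify]
      exact PySem.Dict.nodup_keys_insert _ _ _ h3
    · intro hnil; simp at hnil
    · intro v hv
      simp only
      rcases List.mem_append.mp hv with hvxs | hvx
      · rw [h5 v hvxs, fIdx_append_mem _ _ _ hvxs]
      · have : v = x := by simpa using hvx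
        subst this
        rw [h5 v hx, fIdx_append_mem _ _ _ hx]
    · exact hlast
  · have hc : count.contains x = false := by rw [h2]; simp [hx]
    have e : stepB x (xs.length : Int) (count, first, last) =
        ((count.insert x 0).modify x 0 (· + 1), first.insert x (xs.length : Int),
          last.insert x (xs.length : Int)) := by
      simp [stepB, hc]
    rw [e]
    refine ⟨?_, ?_, ?_, ?_, ?_, ?_⟩
    · intro v
      simp only
      rw [PySem.Dict.getD_modify]
      by_cases hvx : v = x
      · subst hvx
        rw [if_pos rfl, PySem.Dict.getD_insert, if_pos rfl]
        have : xs.count v = 0 := List.count_eq_zero.mpr hx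
        simp [List.count_append, this]
      · rw [if_neg hvx, PySem.Dict.getD_insert, if_neg hvx, h1]
        simp [List.count_append, Ne.symm hvx]
    · intro v
      simp only
      rw [PySem.Dict.contains_modify, PySem.Dict.contains_insert, h2]
      by_cases hvx : v = x
      · subst hvx; simp
      · simp [hvx]
    · simp only
      rw [PySem.Dict.keys_modify]
      exact PySem.Dict.nodup_keys_insert _ _ _
        (PySem.Dict.nodup_keys_insert _ _ _ h3)
    · intro hnil; simp at hnil
    · intro v hv
      simp only
      rw [PySem.Dict.getD_insert]
      by_cases hvx : v = x
      · subst hvx; rw [if_pos rfl, fIdx_append_self _ _ hx]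
      · rw [if_neg hvx]
        have hvxs : v ∈ xs := by
          rcases List.mem_append.mp hv with h' | h'
          · exact h'
          · exact absurd (by simpa using h') hvx
        rw [h5 v hvxs, fIdx_append_mem _ _ _ hvxs]
    · exact hlast

theorem invA_fold (xs : List Int) :
    InvA xs ((PySem.List.enumerate xs 0).foldl (fun st p => stepA p.2 p.1 st)
      (PySem.Dict.empty, PySem.Dict.empty, 0, 0, 0)) := by
  induction xs using List.reverseRecOn with
  | nil =>
    simp [PySem.List.enumerate, InvA, PySem.Dict.getD_empty, PySem.Dict.contains_empty]
  | append_singleton xs x ih =>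
    rw [PySem.List.enumerate_append, List.foldl_append]
    simp only [PySem.List.enumerate, List.foldl_cons, List.foldl_nil, zero_add]
    exact invA_step xs x _ ih

theorem invB_fold (xs : List Int) :
    InvB xs ((PySem.List.enumerate xs 0).foldl (fun t p => stepB p.2 p.1 t)
      (PySem.Dict.empty, PySem.Dict.empty, PySem.Dict.empty)) := by
  induction xs using List.reverseRecOn with
  | nil =>
    simp [PySem.List.enumerate, InvB, PySem.Dict.getD_empty, PySem.Dict.contains_empty]
  | append_singleton xs x ih =>
    rw [PySem.List.enumerate_append, List.foldl_append]
    simp only [PySem.List.enumerate, List.foldl_cons, List.foldl_nil, zero_add]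
    exact invB_step xs x _ ih

theorem foldl_add_one (l : List Int) (init : Int) :
    l.foldl (fun a _ => a + 1) init = init + (l.length : Int) := by
  induction l generalizing init with
  | nil => simp
  | cons y t ih => simp [List.foldl_cons, ih]; omega

theorem range_map_eq_enumerate (d : List Int) (n : Int) (h : n ≤ (d.length : Int)) :
    (PySem.List.pyRange 0 n 1).map (fun i => (i, PySem.List.pyGetD d i 0)) =
      PySem.List.enumerate (d.take n.toNat) 0 := by
  by_cases hn : n ≤ 0
  · rw [PySem.List.pyRange_one_eq_nil hn]
    have : n.toNat = 0 := by omega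
    simp [this]
  · push Not at hn
    have hlen : ((d.take n.toNat).length : Int) = n := by
      simp [List.length_take]; omega
    rw [PySem.List.enumerate_eq_map_pyRange (d := 0), PySem.List.len_eq, hlen]
    apply List.map_congr_left
    intro j hj
    rw [PySem.List.mem_pyRange_one] at hj
    have h1 : PySem.List.pyGetD d j 0 = PySem.List.pyGetD (d.take n.toNat) j 0 := by
      rw [PySem.List.pyGetD_of_nonneg (h := hj.1), PySem.List.pyGetD_of_nonneg (h := hj.1)]
      rw [List.getD_eq_getElem?_getD, List.getD_eq_getElem?_getD, List.getElem?_take]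
      have : j.toNat < n.toNat := by omega
      simp [this]
    rw [h1]

-- assembling: A's final answer and B's selection agree
theorem result_eq (xs : List Int) (stA) (tB) (hA : InvA xs stA) (hB : InvB xs tB) :
    ((match stA with
     | (_, _, _, k, strindex) =>
       (PySem.List.pyRange strindex (strindex + k) 1).foldl (fun ans _ => ans + 1) 0 : Int)) =
    ((match tB with
     | (count, first, last) =>
       if count.size = 0 then 0
       else
         match PySem.List.max? count.values (fun v => v) with
         | none => 0
         | some m =>
           match PySem.List.min? ((count.keys.filter (fun x => count.getD x 0 == m)).map
                 (fun x => last.getD x 0 - first.getD x 0 + 1)) (fun v => v) with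
           | none => 0
           | some r => r : Int)) := by
  obtain ⟨leftA, countA, z, k, strindex⟩ := stA
  obtain ⟨count, first, last⟩ := tB
  obtain ⟨a1, a2, a3, a4, a5, a6, a7, a8⟩ := hA
  obtain ⟨b1, b2, b3, b4, b5, b6⟩ := hB
  simp only at a1 a2 a3 a4 a5 a6 a7 a8 b1 b2 b3 b4 b5 b6 ⊢
  have hL : (PySem.List.pyRange strindex (strindex + k) 1).foldl
      (fun ans _ => ans + (1 : Int)) 0 = k := by
    rw [foldl_add_one]
    have : ((PySem.List.pyRange strindex (strindex + k) 1).length : Int) = k := by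
      rw [PySem.List.length_pyRange_one]
      omega
    omega
  rw [hL]
  by_cases hxs : xs = []
  · subst hxs
    rw [b4 rfl]
    obtain ⟨hz, hk⟩ := a6 rfl
    simp [hk, PySem.Dict.size_empty]
  · obtain ⟨w0, hw0⟩ := List.exists_mem_of_ne_nil xs hxs
    have hw0k : w0 ∈ count.keys := by
      rw [← PySem.Dict.contains_iff_mem_keys, b2]; simp [hw0]
    have hsize : ¬ count.size = 0 := by
      intro h0
      have hkl : count.keys.length = 0 := by
        simp only [PySem.Dict.keys, PySem.Dict.size] at *
        simp [h0]
      rw [List.length_eq_zero_iff] at hkl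
      rw [hkl] at hw0k
      simp at hw0k
    rw [if_neg hsize]
    obtain ⟨w, hw, hwz, hwk⟩ := a7 hxs
    have hwkeys : w ∈ count.keys := by
      rw [← PySem.Dict.contains_iff_mem_keys, b2]; simp [hw]
    have hvals : count.values = count.keys.map (fun v => count.getD v 0) :=
      PySem.Dict.values_eq_map_keys count b3 0
    have hzv : z ∈ count.values := by
      rw [hvals]
      exact List.mem_map.mpr ⟨w, hwkeys, by rw [b1, hwz]⟩
    have hkeys_mem : ∀ y : Int, y ∈ count.keys → y ∈ xs := by
      intro y hy
      have := (PySem.Dict.contains_iff_mem_keys count y).mpr hy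
      rw [b2] at this
      simpa using this
    cases hmax : PySem.List.max? count.values (fun v => v) with
    | none =>
      rw [PySem.List.max?_eq_none_iff] at hmax
      rw [hmax] at hzv
      simp at hzv
    | some m =>
      have hmz : m = z := by
        have h1' : z ≤ m := PySem.List.max?_isMax hmax z hzv
        have hm_mem := PySem.List.max?_mem hmax
        rw [hvals] at hm_mem
        obtain ⟨y, hy, hym⟩ := List.mem_map.mp hm_mem
        have : m = (xs.count y : Int) := by rw [← hym, b1]
        have := a4 y (hkeys_mem y hy)
        omega
      subst hmz
      have hkL : k ∈ (count.keys.filter (fun v => count.getD v 0 == m)).map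
          (fun v => last.getD v 0 - first.getD v 0 + 1) := by
        apply List.mem_map.mpr
        refine ⟨w, ?_, ?_⟩
        · apply List.mem_filter.mpr
          refine ⟨hwkeys, ?_⟩
          rw [b1, hwz]
          simp
        · rw [b5 w hw, b6 w hw, ← hwk, spanOf]
      cases hmin : PySem.List.min? ((count.keys.filter (fun v => count.getD v 0 == m)).map
          (fun v => last.getD v 0 - first.getD v 0 + 1)) (fun v => v) with
      | none =>
        rw [PySem.List.min?_eq_none_iff] at hmin
        rw [hmin] at hkL
        simp at hkL
      | some r =>
        have hrk : r ≤ k := PySem.List.min?_isMin hmin k hkL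
        have hr_mem := PySem.List.min?_mem hmin
        obtain ⟨y, hy, hyr⟩ := List.mem_map.mp hr_mem
        obtain ⟨hykeys, hyeq⟩ := List.mem_filter.mp hy
        have hyxs : y ∈ xs := hkeys_mem y hykeys
        have hyz : (xs.count y : Int) = m := by
          rw [← b1 y]
          exact beq_iff_eq.mp hyeq
        have hky : k ≤ spanOf xs y := a8 y hyxs hyz
        have : r = spanOf xs y := by
          rw [← hyr, b5 y hyxs, b6 y hyxs, spanOf]
        simp only [hmin]
        omega

-- ===== VERDICT (by name: the statement is the Claim_ definition above) =====
theorem solve_spec : Claim_equal_solve := by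
  intro d n _ hpre
  unfold Spec_solve solve solve_alt
  have hmapA := range_map_eq_enumerate d n hpre
  have hA : (PySem.List.pyRange 0 n 1).foldl
      (fun st i => stepA (PySem.List.pyGetD d i 0) i st)
      (PySem.Dict.empty, PySem.Dict.empty, 0, 0, 0) =
      (PySem.List.enumerate (d.take n.toNat) 0).foldl (fun st p => stepA p.2 p.1 st)
      (PySem.Dict.empty, PySem.Dict.empty, 0, 0, 0) := by
    rw [← hmapA, List.foldl_map]
  have hB : (PySem.List.pyRange 0 n 1).foldl
      (fun t i => stepB (PySem.List.pyGetD d i 0) i t)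
      (PySem.Dict.empty, PySem.Dict.empty, PySem.Dict.empty) =
      (PySem.List.enumerate (d.take n.toNat) 0).foldl (fun t p => stepB p.2 p.1 t)
      (PySem.Dict.empty, PySem.Dict.empty, PySem.Dict.empty) := by
    rw [← hmapA, List.foldl_map]
  rw [hA, hB]
  exact result_eq (d.take n.toNat) _ _ (invA_fold _) (invB_fold _)
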